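-- pv_equiv track=rewrite | github.com/ds-gurukandhamoorthi/intro-python-exs | rle.py | indexRunLength2
-- ===== SOURCE A (Python) =====
-- from itertools import groupby
--
-- def indexRunLength2(array):
--     loc = 0
--     res = []
--     for k, g in groupby(array):
--         count = len(list(g))
--         res += [(loc,count)]
--         loc += count
--     return res
-- ===== SOURCE B (Python) =====
-- def indexRunLength2(array):
--     n = len(array)
--     if n == 0:
--         return []
--     b = [0] + [i for i, (p, c) in enumerate(zip(array, array[1:]), 1) if p != c] + [n]
--     return [(s, t - s) for s, t in zip(b, b[1:])]
-- ===== Notes on version B (the rewrite author's own statement) =====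
-- stated objective: alternative
-- what changed: Replaces itertools.groupby with its running length accumulator by an explicit boundary-index table (one pass marking indices where adjacent elements differ) followed by a subtract-adjacent zip pass.
import Mathlib
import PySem

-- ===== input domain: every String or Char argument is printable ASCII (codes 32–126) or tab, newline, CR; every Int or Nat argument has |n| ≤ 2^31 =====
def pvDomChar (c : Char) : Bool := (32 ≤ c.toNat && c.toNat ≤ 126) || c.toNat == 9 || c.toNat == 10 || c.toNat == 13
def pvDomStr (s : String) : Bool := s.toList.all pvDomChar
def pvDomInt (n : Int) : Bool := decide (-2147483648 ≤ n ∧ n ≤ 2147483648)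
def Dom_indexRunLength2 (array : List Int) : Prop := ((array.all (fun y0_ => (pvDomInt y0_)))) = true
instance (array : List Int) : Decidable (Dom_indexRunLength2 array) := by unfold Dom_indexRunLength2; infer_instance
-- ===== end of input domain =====

-- B replaces groupby's running accumulator by a boundary-index table plus a
-- subtract-adjacent zip pass (alternative decomposition, same return value).

-- ===== PORT A =====
-- itertools.groupby without keys: the list of maximal runs of equal elements,
-- as the obvious structural recursion.
def pyGroupby : List Int → List (List Int)
  | [] => []
  | x :: xs =>
    match pyGroupby xs with
    | [] => [[x]]
    | [] :: rs => [x] :: [] :: rs    -- unreachable: groups are never empty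
    | (h :: t) :: rs => if x = h then (x :: h :: t) :: rs else [x] :: (h :: t) :: rs

def indexRunLength2 (array : List Int) : List (Int × Int) :=
  ((pyGroupby array).foldl
    (fun (st : Int × List (Int × Int)) g =>
      let count : Int := (g.length : Int)
      (st.1 + count, st.2 ++ [(st.1, count)]))
    (0, [])).2

-- ===== PORT B =====
def indexRunLength2_alt (array : List Int) : List (Int × Int) :=
  let n : Int := (array.length : Int)
  if n = 0 then []
  else
    let b : List Int :=
      0 :: ((PySem.List.enumerate (array.zip array.tail) 1).filterMap
              (fun p => if p.2.1 ≠ p.2.2 then some p.1 else none)) ++ [n]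
    List.zipWith (fun s t => (s, t - s)) b b.tail

-- ===== PRECONDITION & SPEC =====
def Spec_indexRunLength2 (array : List Int) (out : List (Int × Int)) : Prop := out = indexRunLength2_alt array
instance (array : List Int) (out : List (Int × Int)) : Decidable (Spec_indexRunLength2 array out) := by unfold Spec_indexRunLength2; infer_instance

-- ===== CLAIM (what is proved, stated in full; the proofs are below) =====
def Claim_equal_indexRunLength2 : Prop := ∀ (array : List Int), Dom_indexRunLength2 array → Spec_indexRunLength2 array (indexRunLength2 array)

-- ===== LEMMAS AND PROOFS =====

-- Reference run-length encoder both ports are reduced to.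
def rleR : Int → List Int → List (Int × Int)
  | _, [] => []
  | i, [_] => [(i, 1)]
  | i, x :: y :: ys =>
    if x = y then
      match rleR (i + 1) (y :: ys) with
      | [] => []
      | (_, c) :: rest => (i, c + 1) :: rest
    else (i, 1) :: rleR (i + 1) (y :: ys)

-- A side -------------------------------------------------------------------

def goA : Int → List (List Int) → List (Int × Int)
  | _, [] => []
  | i, g :: gs => (i, (g.length : Int)) :: goA (i + (g.length : Int)) gs

theorem foldl_goA (gs : List (List Int)) : ∀ (i : Int) (acc : List (Int × Int)),
    ((gs.foldl
      (fun (st : Int × List (Int × Int)) g =>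
        let count : Int := (g.length : Int)
        (st.1 + count, st.2 ++ [(st.1, count)]))
      (i, acc)).2) = acc ++ goA i gs := by
  induction gs with
  | nil => simp [goA]
  | cons g gs ih => intro i acc; simp [goA, ih]

theorem pyGroupby_head (xs : List Int) : ∀ (x : Int),
    ∃ t rs, pyGroupby (x :: xs) = (x :: t) :: rs := by
  induction xs with
  | nil => intro x; exact ⟨[], [], rfl⟩
  | cons y ys ih =>
    intro x
    obtain ⟨t, rs, h⟩ := ih y
    by_cases hxy : x = y
    · exact ⟨y :: t, rs, by simp [pyGroupby] at h ⊢; rw [h]; simp [hxy]⟩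
    · exact ⟨[], (y :: t) :: rs, by simp [pyGroupby] at h ⊢; rw [h]; simp [hxy]⟩

theorem goA_rleR (xs : List Int) : ∀ (x : Int) (i : Int),
    goA i (pyGroupby (x :: xs)) = rleR i (x :: xs) := by
  induction xs with
  | nil => intro x i; simp [pyGroupby, goA, rleR]
  | cons y ys ih =>
    intro x i
    obtain ⟨t, rs, h⟩ := pyGroupby_head ys y
    have hy := ih y (i + 1)
    rw [h] at hy
    by_cases hxy : x = y
    · have hgb : pyGroupby (x :: y :: ys) = (x :: y :: t) :: rs := by
        rw [pyGroupby, h]; simp [hxy]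
      rw [hgb]
      simp only [goA] at hy ⊢
      rw [rleR, if_pos hxy, ← hy]
      simp only [List.length_cons]
      have harith : i + ((t.length : Int) + 1 + 1) = i + 1 + ((t.length : Int) + 1) := by ring
      push_cast
      rw [harith]
    · have hgb : pyGroupby (x :: y :: ys) = [x] :: (y :: t) :: rs := by
        rw [pyGroupby, h]; simp [hxy]
      rw [hgb, rleR, if_neg hxy, ← hy]
      simp [goA]

-- B side -------------------------------------------------------------------

-- boundary markers: positions (counted from s) where adjacent elements differ
def mrk : Int → Int → List Int → List Int
  | _, _, [] => []
  | s, x, y :: ys => if x = y then mrk (s + 1) y ys else s :: mrk (s + 1) y ys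

theorem enum_mrk (xs : List Int) : ∀ (x : Int) (s : Int),
    (PySem.List.enumerate ((x :: xs).zip xs) s).filterMap
      (fun p => if p.2.1 ≠ p.2.2 then some p.1 else none) = mrk s x xs := by
  induction xs with
  | nil => intro x s; simp [PySem.List.enumerate_nil, mrk]
  | cons y ys ih =>
    intro x s
    have ihy := ih y (s + 1)
    simp only [ne_eq, ite_not] at ihy
    rw [show (x :: y :: ys).zip (y :: ys) = (x, y) :: ((y :: ys).zip ys) from rfl,
        PySem.List.enumerate_cons]
    by_cases hxy : x = y
    · simp [mrk, hxy]; exact ihy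
    · simp [mrk, hxy]; exact ihy

-- the subtract-adjacent pass
def zadj : Int → List Int → List (Int × Int)
  | _, [] => []
  | i, a :: r => (i, a - i) :: zadj a r

theorem zipWith_zadj (m : List Int) : ∀ (i : Int),
    List.zipWith (fun s t => (s, t - s)) (i :: m) m = zadj i m := by
  induction m with
  | nil => intro i; rfl
  | cons a r ih => intro i; simp [zadj, ih a]

theorem zadj_rleR (xs : List Int) : ∀ (x i : Int),
    zadj i (mrk (i + 1) x xs ++ [i + 1 + (xs.length : Int)]) = rleR i (x :: xs) := by
  induction xs with
  | nil => intro x i; simp [mrk, zadj, rleR]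
  | cons y ys ih =>
    intro x i
    have hlen : i + 1 + ((y :: ys).length : Int) = i + 1 + 1 + (ys.length : Int) := by
      simp only [List.length_cons]; push_cast; ring
    have ihy := ih y (i + 1)
    by_cases hxy : x = y
    · have hm : mrk (i + 1) x (y :: ys) = mrk (i + 1 + 1) y ys := by simp [mrk, hxy]
      rw [hm, hlen, rleR, if_pos hxy, ← ihy]
      cases hmm : mrk (i + 1 + 1) y ys ++ [i + 1 + 1 + (ys.length : Int)] with
      | nil => simp at hmm
      | cons a r => simp [zadj]; ring
    · have hm : mrk (i + 1) x (y :: ys) = (i + 1) :: mrk (i + 1 + 1) y ys := by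
        simp [mrk, hxy]
      rw [hm, hlen, rleR, if_neg hxy, ← ihy]
      simp [zadj]

-- ===== VERDICT (by name: the statement is the Claim_ definition above) =====
theorem indexRunLength2_spec : Claim_equal_indexRunLength2 := by
  intro array _
  unfold Spec_indexRunLength2
  cases array with
  | nil => rfl
  | cons x xs =>
    show indexRunLength2 (x :: xs) = indexRunLength2_alt (x :: xs)
    have hA : indexRunLength2 (x :: xs) = rleR 0 (x :: xs) := by
      unfold indexRunLength2
      rw [foldl_goA]
      simp [goA_rleR xs x 0]
    have hB : indexRunLength2_alt (x :: xs) = rleR 0 (x :: xs) := by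
      unfold indexRunLength2_alt
      have hne : ¬(((x :: xs).length : Int) = 0) := by
        simp only [List.length_cons]; push_cast; omega
      simp only [if_neg hne, List.cons_append, List.tail_cons]
      rw [zipWith_zadj, enum_mrk]
      have hz := zadj_rleR xs x 0
      norm_num at hz
      have hc : ((x :: xs).length : Int) = 1 + (xs.length : Int) := by
        simp only [List.length_cons]; push_cast; ring
      rw [hc]; exact hz
    rw [hA, hB]
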